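-- pv_equiv track=rewrite | github.com/duartemarco/Dom6python | main.py | calculate_path_boost_for_masters
-- ===== SOURCE A (Python) =====
-- def calculate_path_boost_for_masters(num_slaves):
--     try:
--         num_slaves = int(num_slaves)
--
--         if num_slaves <= 0:
--             return "Number of slaves must be a positive integer."
--
--         max_path_boost = 6
--         path_boost = 0
--
--         while num_slaves >= 2 and path_boost < max_path_boost:
--             num_slaves //= 2
--             path_boost += 1
--
--         return f"Path Boost for Masters: {path_boost}"
--
--     except ValueError:
--         return "Invalid input. Please enter a valid integer."
-- ===== SOURCE B (Python) =====
-- def calculate_path_boost_for_masters(num_slaves):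
--     try:
--         num_slaves = int(num_slaves)
--     except ValueError:
--         return "Invalid input. Please enter a valid integer."
--     if num_slaves <= 0:
--         return "Number of slaves must be a positive integer."
--     return f"Path Boost for Masters: {min(6, num_slaves.bit_length() - 1)}"
-- ===== Notes on version B (the rewrite author's own statement) =====
-- stated objective: simpler
-- what changed: the while loop of repeated halvings is replaced by the closed form min(6, num_slaves.bit_length() - 1)
import Mathlib
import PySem

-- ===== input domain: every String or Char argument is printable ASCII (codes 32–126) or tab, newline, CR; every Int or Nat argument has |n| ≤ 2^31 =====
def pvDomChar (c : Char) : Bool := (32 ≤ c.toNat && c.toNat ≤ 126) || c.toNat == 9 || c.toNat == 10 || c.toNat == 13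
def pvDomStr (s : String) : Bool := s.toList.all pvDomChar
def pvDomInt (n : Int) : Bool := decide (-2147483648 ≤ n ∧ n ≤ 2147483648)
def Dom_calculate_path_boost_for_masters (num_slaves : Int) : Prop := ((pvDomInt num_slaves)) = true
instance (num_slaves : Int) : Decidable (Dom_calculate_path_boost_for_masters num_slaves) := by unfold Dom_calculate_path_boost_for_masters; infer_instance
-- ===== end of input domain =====

-- B replaces A's halving while-loop by the closed form min(6, bit_length - 1); simpler, same value.
-- ===== PORT A =====
-- the while loop of A: halve while num_slaves >= 2 and path_boost < 6
def pvLoopA (n : Int) (path_boost : Nat) : Nat :=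
  if n ≥ 2 ∧ path_boost < 6 then pvLoopA (PySem.Int.floordiv n 2) (path_boost + 1) else path_boost
termination_by 6 - path_boost
decreasing_by omega

def calculate_path_boost_for_masters (num_slaves : Int) : String :=
  -- int(num_slaves) is the identity on an Int argument; the ValueError branch is unreachable
  if num_slaves ≤ 0 then "Number of slaves must be a positive integer."
  else "Path Boost for Masters: " ++ PySem.Int.toStr (pvLoopA num_slaves 0)

-- ===== PORT B =====
-- Python int.bit_length for a nonnegative int (exact there): 0 for 0, log2 + 1 otherwise
def pvBitLength (n : Int) : Nat := if n = 0 then 0 else n.natAbs.log2 + 1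

def calculate_path_boost_for_masters_alt (num_slaves : Int) : String :=
  if num_slaves ≤ 0 then "Number of slaves must be a positive integer."
  else "Path Boost for Masters: " ++ PySem.Int.toStr (min 6 (pvBitLength num_slaves - 1))

-- ===== PRECONDITION & SPEC =====
def Spec_calculate_path_boost_for_masters (num_slaves : Int) (out : String) : Prop := out = calculate_path_boost_for_masters_alt num_slaves
instance (num_slaves : Int) (out : String) : Decidable (Spec_calculate_path_boost_for_masters num_slaves out) := by unfold Spec_calculate_path_boost_for_masters; infer_instance

-- ===== CLAIM (what is proved, stated in full; the proofs are below) =====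
def Claim_equal_calculate_path_boost_for_masters : Prop := ∀ (num_slaves : Int), Dom_calculate_path_boost_for_masters num_slaves → Spec_calculate_path_boost_for_masters num_slaves (calculate_path_boost_for_masters num_slaves)

-- ===== LEMMAS AND PROOFS =====

-- ===== VERDICT (by name: the statement is the Claim_ definition above) =====
-- loop characterisation: for n ≥ 1 and path_boost ≤ 6, the loop returns min 6 (pb + log2 n)
theorem pvLoopA_eq (k : Nat) : ∀ (n : Int) (pb : Nat), 6 - pb ≤ k → 1 ≤ n → pb ≤ 6 →
    pvLoopA n pb = min 6 (pb + n.natAbs.log2) := by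
  induction k with
  | zero =>
    intro n pb hk h1 h6
    have hpb : pb = 6 := by omega
    rw [pvLoopA]
    simp [hpb]
  | succ k ih =>
    intro n pb hk h1 h6
    rw [pvLoopA]
    by_cases h2 : n ≥ 2 ∧ pb < 6
    · have hfd : PySem.Int.floordiv n 2 = n / 2 := by
        simp only [PySem.Int.floordiv]
        exact Int.fdiv_eq_ediv_of_nonneg _ (by omega)
      have h1' : (1:Int) ≤ n / 2 := by omega
      have hrec := ih (n / 2) (pb + 1) (by omega) h1' (by omega)
      have hna : (n / 2).natAbs = n.natAbs / 2 := by omega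
      have hlog : n.natAbs.log2 = (n.natAbs / 2).log2 + 1 := by
        have hd := Nat.log_div_base 2 n.natAbs
        have hp : 0 < Nat.log 2 n.natAbs := Nat.log_pos (by norm_num) (by omega)
        simp only [Nat.log2_eq_log_two]
        omega
      rw [if_pos h2, hfd, hrec, hna, hlog]
      omega
    · simp only [h2, if_false]
      rcases not_and_or.mp h2 with h | h
      · have hn1 : n = 1 := by omega
        have hl : Nat.log2 1 = 0 := by decide
        simp [hn1, hl]
        omega
      · have hpb : pb = 6 := by omega
        simp [hpb]

-- ===== VERDICT (by name: the statement is the Claim_ definition above) =====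
theorem calculate_path_boost_for_masters_spec : Claim_equal_calculate_path_boost_for_masters := by
  intro n _
  unfold Spec_calculate_path_boost_for_masters
  unfold calculate_path_boost_for_masters calculate_path_boost_for_masters_alt
  by_cases h : n ≤ 0
  · simp [h]
  · have h1 : (1:Int) ≤ n := by omega
    have := pvLoopA_eq 6 n 0 (by omega) h1 (by omega)
    simp only [h, if_false, this, pvBitLength, show n ≠ 0 by omega, if_false]
    congr 2
    omega
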